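-- pv_equiv track=rewrite | github.com/Shatha121/LAB_FUNCTIONS_101 | Bonus.py | tringle
-- ===== SOURCE A (Python) =====
-- def tringle(x: int):
--     final_rounds = ""
--     for num in range(x, 0, -1):
--         for num2 in range(num, 0, -1):
--             rounds = str(num2) + " "
--             final_rounds +=rounds
--         final_rounds += "\n"
--     return final_rounds
-- ===== SOURCE B (Python) =====
-- def tringle(x: int):
--     tokens = [str(k) + " " for k in range(x, 0, -1)]
--     rows = ["".join(tokens[i:]) + "\n" for i in range(x)]
--     return "".join(rows)
-- ===== Notes on version B (the rewrite author's own statement) =====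
-- stated objective: faster
-- what changed: Precompute each number's token string once, then build each row as the join of a suffix slice of that token table, instead of re-running str() in a nested countdown loop with repeated string concatenation.
import Mathlib
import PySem

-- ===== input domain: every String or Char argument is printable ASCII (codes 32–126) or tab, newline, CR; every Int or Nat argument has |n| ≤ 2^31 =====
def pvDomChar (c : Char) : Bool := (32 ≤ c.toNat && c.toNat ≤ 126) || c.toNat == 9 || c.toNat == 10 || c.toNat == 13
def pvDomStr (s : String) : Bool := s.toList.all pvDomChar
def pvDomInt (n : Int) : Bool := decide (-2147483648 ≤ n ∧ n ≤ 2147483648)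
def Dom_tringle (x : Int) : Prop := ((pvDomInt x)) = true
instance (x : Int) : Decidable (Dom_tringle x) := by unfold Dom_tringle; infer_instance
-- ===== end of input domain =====

-- B precomputes each token once and builds rows by joining suffix slices of the token table (faster: no repeated str()/+= in a nested loop).

-- ===== PORT A =====
def tringle (x : Int) : String :=
  (PySem.List.pyRange x 0 (-1)).foldl
    (fun final_rounds num =>
      ((PySem.List.pyRange num 0 (-1)).foldl
        (fun acc num2 => acc ++ (PySem.Int.toStr num2 ++ " ")) final_rounds) ++ "\n")
    ""

-- ===== PORT B =====
def tringle_alt (x : Int) : String :=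
  let tokens := (PySem.List.pyRange x 0 (-1)).map (fun k => PySem.Int.toStr k ++ " ")
  let rows := (PySem.List.pyRange 0 x 1).map
    (fun i => PySem.Str.join "" (PySem.List.slice tokens (some i) none) ++ "\n")
  PySem.Str.join "" rows

-- ===== PRECONDITION & SPEC =====
def Spec_tringle (x : Int) (out : String) : Prop := out = tringle_alt x
instance (x : Int) (out : String) : Decidable (Spec_tringle x out) := by unfold Spec_tringle; infer_instance

-- ===== CLAIM (what is proved, stated in full; the proofs are below) =====
def Claim_equal_tringle : Prop := ∀ (x : Int), Dom_tringle x → Spec_tringle x (tringle x)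

-- ===== LEMMAS AND PROOFS =====

-- a foldl that only appends to its accumulator factors through the initial accumulator
theorem pv_foldl_factor (l : List Int) (f : Int → String) (init : String) :
    l.foldl (fun a n => a ++ f n) init = init ++ l.foldl (fun a n => a ++ f n) "" := by
  induction l generalizing init with
  | nil => simp
  | cons h t ih =>
      simp only [List.foldl_cons]
      rw [ih (init ++ f h), ih ("" ++ f h), String.append_assoc]
      simp

-- foldl respects pointwise-equal step functions
theorem pv_foldl_ext (l : List Int) (f g : String → Int → String)
    (h : ∀ a n, f a n = g a n) (init : String) : l.foldl f init = l.foldl g init := by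
  induction l generalizing init with
  | nil => rfl
  | cons x t ih => simp only [List.foldl_cons, h]; exact ih _

-- joining with the empty separator peels off the head as a plain append
theorem pv_join_cons (s : String) (l : List String) :
    PySem.Str.join "" (s :: l) = s ++ PySem.Str.join "" l := by
  have h : List.intercalate ([] : List Char) (s.toList :: l.map String.toList)
      = s.toList ++ List.intercalate [] (l.map String.toList) := by
    cases l <;> simp [List.intercalate]
  simp [PySem.Str.join, PySem.Chars.join, h]

-- an append-only foldl from "" is the join of the mapped list
theorem pv_foldl_join (l : List Int) (f : Int → String) :
    l.foldl (fun a n => a ++ f n) "" = PySem.Str.join "" (l.map f) := by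
  induction l with
  | nil => simp [PySem.Str.join, PySem.Chars.join, List.intercalate]
  | cons h t ih =>
      simp only [List.foldl_cons, List.map_cons]
      rw [pv_foldl_factor, ih, pv_join_cons, String.empty_append]

theorem tringle_spec_aux (x : Int) : tringle x = tringle_alt x := by
  unfold tringle tringle_alt
  by_cases hx : x ≤ 0
  · rw [PySem.List.pyRange_neg_one_eq_nil hx, PySem.List.pyRange_one_eq_nil hx]
    simp [PySem.Str.join, PySem.Chars.join, List.intercalate]
  · rw [not_le] at hx
    -- the outer fold is the join of the per-row strings
    have houter :
        (PySem.List.pyRange x 0 (-1)).foldl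
          (fun final_rounds num =>
            ((PySem.List.pyRange num 0 (-1)).foldl
              (fun acc num2 => acc ++ (PySem.Int.toStr num2 ++ " ")) final_rounds) ++ "\n") ""
          = PySem.Str.join ""
              ((PySem.List.pyRange x 0 (-1)).map (fun num =>
                PySem.Str.join "" ((PySem.List.pyRange num 0 (-1)).map
                  (fun k => PySem.Int.toStr k ++ " ")) ++ "\n")) := by
      rw [pv_foldl_ext _ _
        (fun a num => a ++ (PySem.Str.join "" ((PySem.List.pyRange num 0 (-1)).map
          (fun k => PySem.Int.toStr k ++ " ")) ++ "\n"))
        (by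
          intro a num
          rw [pv_foldl_factor _ _ a, String.append_assoc]
          rw [pv_foldl_join])]
      rw [pv_foldl_join]
    rw [houter]
    congr 1
    have hn : x = ((x.toNat : ℕ) : Int) := by omega
    have hA : PySem.List.pyRange x 0 (-1)
        = (List.range x.toNat).map (fun k : ℕ => x - (k : Int)) := by
      rw [PySem.List.pyRange_neg_one]
      have : (x - 0).toNat = x.toNat := by omega
      rw [this]
    have hB : PySem.List.pyRange 0 x 1
        = (List.range x.toNat).map (fun k : ℕ => (k : Int)) := by
      rw [PySem.List.pyRange_one]
      have : (x - 0).toNat = x.toNat := by omega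
      rw [this]
      exact List.map_congr_left (by intro a _; simp)
    rw [hA, hB, List.map_map, List.map_map]
    apply List.map_congr_left
    intro k hk
    rw [List.mem_range] at hk
    simp only [Function.comp_apply]
    congr 1
    -- the tokens of row x-k are the token table with the first k entries dropped
    rw [PySem.List.slice_from_natCast, ← List.map_drop, ← List.map_drop]
    have hdrop : (List.range x.toNat).drop k = (List.range (x.toNat - k)).map (k + ·) := by
      have h1 : x.toNat = k + (x.toNat - k) := by omega
      rw [h1, List.range_add, List.drop_append_of_le_length (by simp)]
      simp
    rw [hdrop, List.map_map, List.map_map]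
    have hrng : PySem.List.pyRange (x - (k : Int)) 0 (-1)
        = (List.range (x.toNat - k)).map (fun j : ℕ => x - (k : Int) - (j : Int)) := by
      rw [PySem.List.pyRange_neg_one]
      have : (x - (k : Int) - 0).toNat = x.toNat - k := by omega
      rw [this]
    rw [hrng, List.map_map]
    congr 1
    apply List.map_congr_left
    intro j _
    simp only [Function.comp_apply]
    have hc : x - (k : Int) - (j : Int) = x - ((k + j : ℕ) : Int) := by push_cast; ring
    rw [hc]

-- ===== VERDICT (by name: the statement is the Claim_ definition above) =====
theorem tringle_spec : Claim_equal_tringle := by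
  intro x _
  exact tringle_spec_aux x
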